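-- pv_equiv track=rewrite | github.com/PiyushDeshmukh-apperentice/C.A.R.E.-Insurance | extractor.py | bill_rules
-- ===== SOURCE A (Python) =====
-- def bill_rules(lines):
--     charges = {}
--     items = ["Consultation", "Lab", "Imaging", "Meds", "Procedures", "Total"]
--
--     for i, line in enumerate(lines):
--         for item in items:
--             if item.lower() in line.lower():
--                 if i + 1 < len(lines):
--                     charges[item.lower()] = lines[i + 1]
--
--     return charges
-- ===== SOURCE B (Python) =====
-- def bill_rules(lines):
--     items = ["Consultation", "Lab", "Imaging", "Meds", "Procedures", "Total"]
--     n = len(lines)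
--     # pass 1: record, in first-hit order, the keys that get set at all
--     order = []
--     for i in range(n - 1):
--         low = lines[i].lower()
--         for item in items:
--             k = item.lower()
--             if k in low and k not in order:
--                 order.append(k)
--     # pass 2: for each key, find its LAST matching line directly (reverse scan)
--     charges = {}
--     for k in order:
--         for i in reversed(range(n - 1)):
--             if k in lines[i].lower():
--                 charges[k] = lines[i + 1]
--                 break
--     return charges
-- ===== Notes on version B (the rewrite author's own statement) =====
-- stated objective: alternative
-- what changed: Replaces the dict-overwrite forward loop by two explicit passes: one forward pass that records key first-hit order, then per key a reverse scan with early break that finds the last matching line directly, so each key is written exactly once.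
import Mathlib
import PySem

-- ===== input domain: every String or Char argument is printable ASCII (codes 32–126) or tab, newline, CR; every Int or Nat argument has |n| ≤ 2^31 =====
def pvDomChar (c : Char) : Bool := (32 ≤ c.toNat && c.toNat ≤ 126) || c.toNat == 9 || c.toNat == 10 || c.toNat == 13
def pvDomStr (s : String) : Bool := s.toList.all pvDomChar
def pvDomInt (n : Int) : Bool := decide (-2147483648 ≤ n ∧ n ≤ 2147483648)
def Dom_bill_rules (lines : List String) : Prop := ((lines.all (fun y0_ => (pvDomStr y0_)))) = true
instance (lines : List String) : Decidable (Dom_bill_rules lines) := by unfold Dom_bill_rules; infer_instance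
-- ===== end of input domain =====

-- B replaces A's dict-overwrite forward loop by two passes: a forward pass recording key
-- first-hit order, then per key a reverse scan (early break) finding the last matching line
-- directly; objective: alternative decomposition, same cost.

-- the fixed item labels (shared literal of both programs)
def pvItems : List String := ["Consultation", "Lab", "Imaging", "Meds", "Procedures", "Total"]

-- ===== PORT A =====
def bill_rules (lines : List String) : List (String × String) :=
  (List.foldl (fun charges (p : Int × String) =>
      List.foldl (fun charges item =>
        if PySem.Str.isIn (PySem.Str.lower item) (PySem.Str.lower p.2) then
          if p.1 + 1 < (lines.length : Int) then
            PySem.Dict.insert charges (PySem.Str.lower item)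
              (PySem.List.pyGetD lines (p.1 + 1) "")
          else charges
        else charges) charges pvItems)
    PySem.Dict.empty (PySem.List.enumerate lines)).items

-- ===== PORT B =====
-- reverse scan of Source B's 'for i in reversed(range(n - 1)): … break'
def pvFindBack (lines : List String) (k : String) : List Int → Option String
  | [] => none
  | i :: rest =>
    if PySem.Str.isIn k (PySem.Str.lower (PySem.List.pyGetD lines i "")) then
      some (PySem.List.pyGetD lines (i + 1) "")
    else pvFindBack lines k rest

def bill_rules_alt (lines : List String) : List (String × String) :=
  let n : Int := lines.length
  let order : List String :=
    List.foldl (fun order i =>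
      let low := PySem.Str.lower (PySem.List.pyGetD lines i "")
      List.foldl (fun order item =>
        let k := PySem.Str.lower item
        if PySem.Str.isIn k low && !(List.contains order k) then order ++ [k] else order)
        order pvItems)
      [] (PySem.List.pyRange 0 (n - 1) 1)
  (List.foldl (fun charges k =>
      match pvFindBack lines k ((PySem.List.pyRange 0 (n - 1) 1).reverse) with
      | some v => PySem.Dict.insert charges k v
      | none => charges)
    PySem.Dict.empty order).items

-- ===== PRECONDITION & SPEC =====
def Spec_bill_rules (lines : List String) (out : List (String × String)) : Prop := out = bill_rules_alt lines
instance (lines : List String) (out : List (String × String)) : Decidable (Spec_bill_rules lines out) := by unfold Spec_bill_rules; infer_instance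

-- ===== CLAIM (what is proved, stated in full; the proofs are below) =====
def Claim_equal_bill_rules : Prop := ∀ (lines : List String), Dom_bill_rules lines → Spec_bill_rules lines (bill_rules lines)

-- ===== LEMMAS AND PROOFS =====

-- lowered line i
def pvLowLine (lines : List String) (i : Nat) : String :=
  PySem.Str.lower (lines.getD i "")

-- the lowered item keys matching line i
def pvMatchKeys (lines : List String) (i : Nat) : List String :=
  (pvItems.filter (fun it => PySem.Str.isIn (PySem.Str.lower it) (pvLowLine lines i))).map PySem.Str.lower

-- the (key, value) insert events A performs at line i (only lines 0..len-2 insert)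
def pvChunk (lines : List String) (i : Nat) : List (String × String) :=
  (pvMatchKeys lines i).map (fun k => (k, lines.getD (i + 1) ""))

def pvEvs (lines : List String) : List (String × String) :=
  (List.range (lines.length - 1)).flatMap (pvChunk lines)

def pvD (E : List (String × String)) : PySem.Dict String String :=
  E.foldl (fun d p => d.insert p.1 p.2) PySem.Dict.empty

def pvLastV (E : List (String × String)) (k : String) : String :=
  match E.reverse.find? (fun p => p.1 == k) with
  | some p => p.2
  | none => ""

lemma pvLastV_append (E : List (String × String)) (k v : String) (k' : String) :
    pvLastV (E ++ [(k, v)]) k' = if k' = k then v else pvLastV E k' := by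
  unfold pvLastV
  rw [List.reverse_append]
  simp only [List.reverse_cons, List.reverse_nil, List.nil_append, List.cons_append,
    List.find?_cons]
  by_cases h : k = k'
  · subst h; simp
  · have hb : (k == k') = false := by simp only [beq_eq_false_iff_ne, ne_eq]; exact h
    rw [hb, if_neg (Ne.symm h)]

lemma dedup_append_singleton (xs : List String) (k : String) :
    PySem.List.dedup (xs ++ [k]) =
      if k ∈ xs then PySem.List.dedup xs else PySem.List.dedup xs ++ [k] := by
  rw [PySem.List.dedup_eq_ofList, PySem.List.dedup_eq_ofList, PySem.Set.ofList_eq_foldl,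
    PySem.Set.ofList_eq_foldl, List.foldl_append]
  simp only [List.foldl_cons, List.foldl_nil]
  show PySem.Set.add _ k = _
  rw [PySem.Set.add]
  by_cases h : k ∈ xs
  · rw [if_pos, if_pos h]
    rw [← PySem.Set.ofList_eq_foldl, PySem.Set.contains_iff, PySem.Set.mem_ofList]; exact h
  · rw [if_neg, if_neg h]
    rw [← PySem.Set.ofList_eq_foldl, PySem.Set.contains_iff, PySem.Set.mem_ofList]
    simpa using h

-- dict fold characterisation: keys in first-insert order, each with its last value
lemma pvD_items (E : List (String × String)) :
    (pvD E).items = (PySem.List.dedup (E.map Prod.fst)).map (fun k => (k, pvLastV E k)) := by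
  induction E using List.reverseRecOn with
  | nil => simp [pvD, pvLastV, PySem.List.dedup, PySem.Dict.empty, PySem.Set.ofList]
  | append_singleton E p ih =>
    obtain ⟨k, v⟩ := p
    have hkeys : (pvD E).keys = PySem.List.dedup (E.map Prod.fst) := by
      show ((pvD E).items).map Prod.fst = _
      rw [ih, List.map_map]
      have : (Prod.fst ∘ fun k => (k, pvLastV E k)) = (id : String → String) := rfl
      rw [this, List.map_id]
    have hcont : (pvD E).contains k = true ↔ k ∈ E.map Prod.fst := by
      rw [PySem.Dict.contains_iff_mem_keys, hkeys, PySem.List.dedup_eq_ofList,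
        PySem.Set.mem_ofList]
    have hfold : pvD (E ++ [(k, v)]) = (pvD E).insert k v := by
      unfold pvD; rw [List.foldl_append]; rfl
    rw [hfold, PySem.Dict.items_insert, List.map_append, List.map_cons, List.map_nil,
      dedup_append_singleton]
    by_cases h : k ∈ E.map Prod.fst
    · rw [if_pos (hcont.mpr h), if_pos h, ih, List.map_map]
      apply List.map_congr_left
      intro k' hk'
      simp only [Function.comp]
      rw [pvLastV_append]
      by_cases hek : k' = k
      · subst hek; simp
      · simp [beq_iff_eq, hek]
    · rw [if_neg (by simp only [Bool.not_eq_true]; rw [← Bool.not_eq_true]; intro hc; exact h (hcont.mp hc)),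
        if_neg h, ih, List.map_append]
      congr 1
      · apply List.map_congr_left
        intro k' hk'
        have : k' ≠ k := by
          rw [PySem.List.dedup_eq_ofList, PySem.Set.mem_ofList] at hk'
          intro hEq; exact h (hEq ▸ hk')
        rw [pvLastV_append, if_neg this]
      · simp [pvLastV_append]

lemma enumerate_eq_map (xs : List String) (s : Int) :
    PySem.List.enumerate xs s = (List.range xs.length).map (fun (i : Nat) => ((s + i : Int), xs.getD i "")) := by
  induction xs generalizing s with
  | nil => simp [PySem.List.enumerate]
  | cons x xs ih =>
    rw [PySem.List.enumerate]
    rw [List.length_cons, List.range_succ_eq_map, List.map_cons, List.map_map]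
    simp only [Nat.cast_zero, add_zero, List.getD_cons_zero]
    congr 1
    rw [ih (s + 1)]
    apply List.map_congr_left
    intro i _
    simp only [Function.comp_apply, List.getD_cons_succ]
    congr 1
    push_cast; ring

-- inner guarded fold = fold of inserts over the filtered key list
lemma foldl_guard_insert (l : List String) (c : String → Bool) (v : String)
    (d : PySem.Dict String String) :
    List.foldl (fun d x => if c x then d.insert (PySem.Str.lower x) v else d) d l
      = List.foldl (fun d p => d.insert p.1 p.2) d
          (((l.filter c).map PySem.Str.lower).map (fun k => (k, v))) := by
  induction l generalizing d with
  | nil => rfl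
  | cons x xs ih =>
    rw [List.foldl_cons, List.filter_cons]
    by_cases h : c x
    · rw [if_pos h, if_pos h, List.map_cons, List.map_cons, List.foldl_cons, ih]
    · rw [if_neg h, if_neg h, ih]

lemma foldl_id {α β : Type} (l : List α) (init : β) : List.foldl (fun d _ => d) init l = init := by
  induction l generalizing init with
  | nil => rfl
  | cons x xs ih => rw [List.foldl_cons]; exact ih init

lemma bill_rules_eq_pvD (lines : List String) :
    bill_rules lines = (pvD (pvEvs lines)).items := by
  unfold bill_rules
  rw [enumerate_eq_map lines 0, List.foldl_map]
  simp only [zero_add]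
  congr 1
  rcases hn : lines.length with _ | m
  · have : lines = [] := List.length_eq_zero_iff.mp hn
    subst this
    rfl
  · rw [List.range_succ, List.foldl_append, List.foldl_cons, List.foldl_nil]
    have hlast : ∀ (d : PySem.Dict String String),
        List.foldl (fun charges item =>
          if PySem.Str.isIn (PySem.Str.lower item) (PySem.Str.lower (lines.getD m "")) then
            if (m : Int) + 1 < ((m + 1 : Nat) : Int) then
              PySem.Dict.insert charges (PySem.Str.lower item)
                (PySem.List.pyGetD lines ((m : Int) + 1) "")
            else charges
          else charges) d pvItems = d := by
      intro d
      have hlt : ¬ (((m : Int)) + 1 < ((m + 1 : Nat) : Int)) := by push_cast; omega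
      rw [PySem.List.foldl_congr_mem _ _ (fun d _ => d) d ?_, foldl_id]
      intro acc x _
      rw [if_neg hlt]
      exact ite_self acc
    rw [hlast]
    rw [PySem.List.foldl_congr_mem _ _
      (fun (d : PySem.Dict String String) (i : Nat) =>
        List.foldl (fun d p => d.insert p.1 p.2) d (pvChunk lines i)) _ ?_]
    · rw [← List.foldl_flatMap]
      unfold pvD pvEvs
      rw [hn]
      norm_num
    · intro acc i hi
      have hiw : i < m := List.mem_range.mp hi
      have hlt : ((i : Int)) + 1 < ((m + 1 : Nat) : Int) := by push_cast; omega
      have hval : PySem.List.pyGetD lines (((i : Int)) + 1) "" = lines.getD (i + 1) "" := by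
        have h2 : ((i : Int)) + 1 = ((i + 1 : Nat) : Int) := by push_cast; ring
        rw [h2, PySem.List.pyGetD_natCast]
      calc List.foldl _ acc pvItems
          = List.foldl (fun d x =>
              if PySem.Str.isIn (PySem.Str.lower x) (pvLowLine lines i) then
                d.insert (PySem.Str.lower x) (lines.getD (i + 1) "") else d) acc pvItems := by
            apply PySem.List.foldl_congr_mem
            intro a x _
            rw [if_pos hlt, hval]
            rfl
        _ = _ := by
            rw [foldl_guard_insert pvItems _ (lines.getD (i + 1) "") acc]
            unfold pvChunk pvMatchKeys
            rfl

lemma pyRange_head (lines : List String) :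
    PySem.List.pyRange 0 ((lines.length : Int) - 1) 1
      = (List.range (lines.length - 1)).map (fun (j : Nat) => (j : Int)) := by
  rcases hn : lines.length with _ | m
  · show PySem.List.pyRange 0 (-1) 1 = _
    norm_num
  · have h1 : ((m + 1 : Nat) : Int) - 1 = ((m : Nat) : Int) := by push_cast; ring
    rw [h1, PySem.List.pyRange_zero_natCast]
    norm_num

lemma mem_pvMatchKeys (lines : List String) (i : Nat) (k : String)
    (hk : ∃ it ∈ pvItems, k = PySem.Str.lower it) :
    k ∈ pvMatchKeys lines i ↔ PySem.Str.isIn k (pvLowLine lines i) = true := by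
  constructor
  · intro h
    obtain ⟨it, hit, rfl⟩ := List.mem_map.mp h
    exact (List.mem_filter.mp hit).2
  · intro h
    obtain ⟨it, hit, rfl⟩ := hk
    exact List.mem_map.mpr ⟨it, List.mem_filter.mpr ⟨hit, h⟩, rfl⟩

-- the guarded append fold is the Set.add fold over the filtered keys
lemma foldl_guard_add (l : List String) (c : String → Bool) (s : PySem.Set String) :
    List.foldl (fun (order : List String) x =>
        if c x && !(List.contains order (PySem.Str.lower x)) then order ++ [PySem.Str.lower x] else order) s l
      = List.foldl PySem.Set.add s ((l.filter c).map PySem.Str.lower) := by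
  induction l generalizing s with
  | nil => rfl
  | cons x xs ih =>
    rw [List.foldl_cons, List.filter_cons]
    by_cases h : c x
    · rw [if_pos h, List.map_cons, List.foldl_cons, ← ih]
      congr 1
      rw [PySem.Set.add, PySem.Set.contains_eq_listContains]
      simp only [h, Bool.true_and]
      by_cases hm : List.contains s (PySem.Str.lower x) <;> simp [hm]
    · rw [if_neg h, ← ih]
      congr 1
      simp [h]

lemma pvOrder_eq (lines : List String) :
    (List.foldl (fun order i =>
      let low := PySem.Str.lower (PySem.List.pyGetD lines i "")
      List.foldl (fun order item =>
        let k := PySem.Str.lower item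
        if PySem.Str.isIn k low && !(List.contains order k) then order ++ [k] else order)
        order pvItems)
      [] (PySem.List.pyRange 0 ((lines.length : Int) - 1) 1))
    = PySem.List.dedup ((pvEvs lines).map Prod.fst) := by
  rw [pyRange_head, List.foldl_map]
  have hchunk : ∀ j, (pvChunk lines j).map Prod.fst = pvMatchKeys lines j := by
    intro j
    unfold pvChunk
    rw [List.map_map]
    exact List.map_id _
  have hmapfst : (pvEvs lines).map Prod.fst
      = (List.range (lines.length - 1)).flatMap (pvMatchKeys lines) := by
    unfold pvEvs
    rw [List.map_flatMap]
    simp only [hchunk]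
  rw [hmapfst, PySem.List.dedup_eq_ofList, PySem.Set.ofList_eq_foldl, List.foldl_flatMap]
  apply PySem.List.foldl_congr_mem
  intro acc j _
  show List.foldl _ acc pvItems = _
  have hlow : PySem.Str.lower (PySem.List.pyGetD lines (j : Int) "") = pvLowLine lines j := by
    rw [PySem.List.pyGetD_natCast]; rfl
  rw [hlow]
  rw [foldl_guard_add pvItems (fun it => PySem.Str.isIn (PySem.Str.lower it) (pvLowLine lines j)) acc]
  rfl

lemma find?_beq (l : List String) (k : String) :
    l.find? (· == k) = if k ∈ l then some k else none := by
  induction l with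
  | nil => simp
  | cons x xs ih =>
    rw [List.find?_cons]
    by_cases h : x = k
    · subst h; simp
    · have hb : (x == k) = false := by simpa using h
      rw [hb, ih]
      have h' : ¬ k = x := fun e => h e.symm
      simp [h']

lemma find?_chunk_reverse (lines : List String) (j : Nat) (k : String)
    (hk : ∃ it ∈ pvItems, k = PySem.Str.lower it) :
    ((pvChunk lines j).reverse).find? (fun p => p.1 == k)
      = if PySem.Str.isIn k (pvLowLine lines j) = true then some (k, lines.getD (j + 1) "") else none := by
  unfold pvChunk
  rw [← List.map_reverse, List.find?_map]
  have : ((fun (p : String × String) => p.1 == k) ∘ (fun k' => (k', lines.getD (j + 1) ""))) = (· == k) := rfl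
  rw [this, find?_beq]
  by_cases h : PySem.Str.isIn k (pvLowLine lines j) = true
  · rw [if_pos ((List.mem_reverse).mpr ((mem_pvMatchKeys lines j k hk).mpr h)), if_pos h]
    rfl
  · rw [if_neg (fun hm => h ((mem_pvMatchKeys lines j k hk).mp (List.mem_reverse.mp hm))), if_neg h]
    rfl

lemma findBack_flat (lines : List String) (k : String)
    (hk : ∃ it ∈ pvItems, k = PySem.Str.lower it) (is : List Nat) :
    pvFindBack lines k (is.map (fun (j : Nat) => (j : Int)))
      = Option.map Prod.snd ((is.flatMap (fun j => (pvChunk lines j).reverse)).find? (fun p => p.1 == k)) := by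
  induction is with
  | nil => rfl
  | cons j rest ih =>
    rw [List.map_cons, List.flatMap_cons, List.find?_append, pvFindBack]
    rw [PySem.List.pyGetD_natCast]
    rw [find?_chunk_reverse lines j k hk]
    by_cases h : PySem.Str.isIn k (pvLowLine lines j) = true
    · rw [if_pos h, if_pos]
      · have : ((j : Int) + 1) = ((j + 1 : Nat) : Int) := by push_cast; ring
        rw [this, PySem.List.pyGetD_natCast]
        rfl
      · exact h
    · rw [if_neg h, if_neg]
      · rw [ih]
        rfl
      · exact h

lemma mem_evs_fst (lines : List String) (k : String)
    (hmem : k ∈ (pvEvs lines).map Prod.fst) : ∃ it ∈ pvItems, k = PySem.Str.lower it := by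
  obtain ⟨p, hp, rfl⟩ := List.mem_map.mp hmem
  obtain ⟨j, _, hpj⟩ := List.mem_flatMap.mp hp
  unfold pvChunk at hpj
  obtain ⟨k', hk', rfl⟩ := List.mem_map.mp hpj
  obtain ⟨it, hit, rfl⟩ := List.mem_map.mp hk'
  exact ⟨it, (List.mem_filter.mp hit).1, rfl⟩

lemma pvFindBack_eq (lines : List String) (k : String)
    (hmem : k ∈ (pvEvs lines).map Prod.fst) :
    pvFindBack lines k ((PySem.List.pyRange 0 ((lines.length : Int) - 1) 1).reverse)
      = some (pvLastV (pvEvs lines) k) := by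
  have hk := mem_evs_fst lines k hmem
  rw [pyRange_head, ← List.map_reverse, findBack_flat lines k hk]
  have hflat : ((List.range (lines.length - 1)).reverse).flatMap (fun j => (pvChunk lines j).reverse)
      = (pvEvs lines).reverse := by
    rw [show (pvEvs lines) = (List.range (lines.length - 1)).flatMap (pvChunk lines) from rfl,
      List.reverse_flatMap]
    rfl
  rw [hflat]
  obtain ⟨p, hp, hpk⟩ := List.mem_map.mp hmem
  have hsome : ((pvEvs lines).reverse.find? (fun p => p.1 == k)).isSome := by
    rw [List.find?_isSome]
    exact ⟨p, List.mem_reverse.mpr hp, by simpa using hpk⟩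
  obtain ⟨q, hq⟩ := Option.isSome_iff_exists.mp hsome
  rw [hq]
  unfold pvLastV
  rw [hq]
  rfl

lemma bill_rules_alt_eq (lines : List String) :
    bill_rules_alt lines
      = (PySem.List.dedup ((pvEvs lines).map Prod.fst)).map (fun k => (k, pvLastV (pvEvs lines) k)) := by
  show (List.foldl (fun charges k =>
      match pvFindBack lines k ((PySem.List.pyRange 0 ((lines.length : Int) - 1) 1).reverse) with
      | some v => PySem.Dict.insert charges k v
      | none => charges)
    PySem.Dict.empty
    (List.foldl (fun order i =>
      let low := PySem.Str.lower (PySem.List.pyGetD lines i "")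
      List.foldl (fun order item =>
        let k := PySem.Str.lower item
        if PySem.Str.isIn k low && !(List.contains order k) then order ++ [k] else order)
        order pvItems)
      [] (PySem.List.pyRange 0 ((lines.length : Int) - 1) 1))).items = _
  rw [pvOrder_eq]
  have hnodup : (PySem.List.dedup ((pvEvs lines).map Prod.fst)).Nodup := by
    rw [PySem.List.dedup_eq_ofList]
    exact PySem.Set.nodup_ofList _
  rw [PySem.List.foldl_congr_mem _ _
    (fun (charges : PySem.Dict String String) k => charges.insert k (pvLastV (pvEvs lines) k))
    _ ?_]
  · rw [PySem.Dict.items_foldl_insert_fresh _ (fun a => a) (fun a => pvLastV (pvEvs lines) a) _ ?_ ?_]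
    · show List.map _ _ = _
      rfl
    · intro a _
      rfl
    · simpa using hnodup
  · intro acc x hx
    have hmem : x ∈ (pvEvs lines).map Prod.fst := by
      rw [PySem.List.dedup_eq_ofList, PySem.Set.mem_ofList] at hx
      exact hx
    rw [pvFindBack_eq lines x hmem]

-- ===== VERDICT (by name: the statement is the Claim_ definition above) =====
theorem bill_rules_spec : Claim_equal_bill_rules := by
  intro lines _
  show bill_rules lines = bill_rules_alt lines
  rw [bill_rules_eq_pvD, pvD_items, bill_rules_alt_eq]
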